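-- pv_equiv track=rewrite | github.com/zbc0315/retrospect | skills/retrospect/scripts/parse_session.py | summarize_exchanges
-- ===== SOURCE A (Python) =====
-- MAX_SUMMARY_TURNS = 10
--
-- def summarize_exchanges(exchanges):
--     """Summarize older sessions: keep only user messages, limit count."""
--     summary = []
--     count = 0
--     for role, text in exchanges:
--         if role == "user":
--             count += 1
--             if count > MAX_SUMMARY_TURNS:
--                 summary.append(("user", f"... [{count}+ more user turns omitted] ..."))
--                 break
--             # Truncate long user messages in summary
--             if len(text) > 300:
--                 text = text[:300] + "... [truncated]"
--             summary.append(("user", text))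
--     return summary
-- ===== SOURCE B (Python) =====
-- MAX_SUMMARY_TURNS = 10
--
-- def summarize_exchanges(exchanges):
--     """Summarize older sessions: keep only user messages, limit count."""
--     users = [text for role, text in exchanges if role == "user"]
--     summary = [("user", text[:300] + "... [truncated]" if len(text) > 300 else text)
--                for text in users[:MAX_SUMMARY_TURNS]]
--     if len(users) > MAX_SUMMARY_TURNS:
--         summary.append(("user", f"... [{MAX_SUMMARY_TURNS + 1}+ more user turns omitted] ..."))
--     return summary
-- ===== Notes on version B (the rewrite author's own statement) =====
-- stated objective: simpler
-- what changed: Replaces A's single stateful loop (running counter, mid-loop break, in-place truncation) by a filter-then-slice pipeline: collect user texts, map the truncation over the first 10, append one fixed omission marker if more exist.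
import Mathlib
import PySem

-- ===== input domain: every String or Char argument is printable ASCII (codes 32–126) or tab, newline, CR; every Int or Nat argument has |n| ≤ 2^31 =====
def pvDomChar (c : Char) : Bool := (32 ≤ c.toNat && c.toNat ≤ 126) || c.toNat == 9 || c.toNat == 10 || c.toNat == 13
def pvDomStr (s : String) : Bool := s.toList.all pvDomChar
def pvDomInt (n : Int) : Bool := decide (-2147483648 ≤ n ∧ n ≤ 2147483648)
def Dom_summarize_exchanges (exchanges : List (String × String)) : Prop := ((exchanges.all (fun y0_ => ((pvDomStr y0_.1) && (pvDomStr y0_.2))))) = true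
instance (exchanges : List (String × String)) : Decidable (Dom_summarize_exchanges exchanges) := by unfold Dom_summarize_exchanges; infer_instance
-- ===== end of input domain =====

-- B replaces A's stateful counting loop (running counter, mid-loop break) by a filter-then-slice pipeline (simpler decomposition).

-- ===== PORT A =====
-- A's for-loop with its running counter and break, as structural recursion over (summary, count)
def pvA_loop : List (String × String) → List (String × String) → Int → List (String × String)
  | [], summary, _ => summary
  | (role, text) :: rest, summary, count =>
    if role == "user" then
      if count + 1 > 10 then
        summary ++ [("user", "... [" ++ PySem.Int.toStr (count + 1) ++ "+ more user turns omitted] ...")]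
      else
        pvA_loop rest
          (summary ++ [("user", if 300 < PySem.Str.len text
            then PySem.Str.slice text none (some 300) ++ "... [truncated]" else text)])
          (count + 1)
    else
      pvA_loop rest summary count

def summarize_exchanges (exchanges : List (String × String)) : List (String × String) :=
  pvA_loop exchanges [] 0

-- ===== PORT B =====
def summarize_exchanges_alt (exchanges : List (String × String)) : List (String × String) :=
  let users := exchanges.filterMap (fun p => if p.1 == "user" then some p.2 else none)
  let summary := (PySem.List.slice users none (some 10)).map
    (fun text => ("user", if 300 < PySem.Str.len text
      then PySem.Str.slice text none (some 300) ++ "... [truncated]" else text))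
  if users.length > 10 then
    summary ++ [("user", "... [" ++ PySem.Int.toStr (10 + 1) ++ "+ more user turns omitted] ...")]
  else
    summary

-- ===== PRECONDITION & SPEC =====
def Spec_summarize_exchanges (exchanges : List (String × String)) (out : List (String × String)) : Prop := out = summarize_exchanges_alt exchanges
instance (exchanges : List (String × String)) (out : List (String × String)) : Decidable (Spec_summarize_exchanges exchanges out) := by unfold Spec_summarize_exchanges; infer_instance

-- ===== CLAIM (what is proved, stated in full; the proofs are below) =====
def Claim_equal_summarize_exchanges : Prop := ∀ (exchanges : List (String × String)), Dom_summarize_exchanges exchanges → Spec_summarize_exchanges exchanges (summarize_exchanges exchanges)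

-- ===== LEMMAS AND PROOFS =====

def pvUsers (xs : List (String × String)) : List String :=
  xs.filterMap (fun p => if p.1 == "user" then some p.2 else none)

def pvTrunc (text : String) : String × String :=
  ("user", if 300 < PySem.Str.len text
    then PySem.Str.slice text none (some 300) ++ "... [truncated]" else text)

def pvOmit : String × String := ("user", "... [" ++ PySem.Int.toStr (10 + 1) ++ "+ more user turns omitted] ...")

lemma pvUsers_cons_user (t : String) (rest : List (String × String)) :
    pvUsers (("user", t) :: rest) = t :: pvUsers rest := by simp [pvUsers]

lemma pvUsers_cons_other (r t : String) (rest : List (String × String)) (hr : ¬ r = "user") :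
    pvUsers ((r, t) :: rest) = pvUsers rest := by simp [pvUsers, hr]

lemma pvA_loop_eq (xs : List (String × String)) (acc : List (String × String)) (n : Nat) (hn : n ≤ 10) :
    pvA_loop xs acc (n : Int) =
      acc ++ ((pvUsers xs).take (10 - n)).map pvTrunc
          ++ (if 10 - n < (pvUsers xs).length then [pvOmit] else []) := by
  induction xs generalizing acc n with
  | nil => simp [pvA_loop, pvUsers]
  | cons p rest ih =>
    obtain ⟨r, t⟩ := p
    by_cases hre : r = "user"
    · subst hre
      have hstep : pvA_loop (("user", t) :: rest) acc (n : Int) =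
          (if (n : Int) + 1 > 10 then
             acc ++ [("user", "... [" ++ PySem.Int.toStr ((n : Int) + 1) ++ "+ more user turns omitted] ...")]
           else pvA_loop rest (acc ++ [pvTrunc t]) ((n : Int) + 1)) := by
        simp [pvA_loop, pvTrunc]
      rw [hstep, pvUsers_cons_user]
      by_cases h10 : n = 10
      · subst h10
        rw [if_pos (by norm_num)]
        have h11 : ((10 : Nat) : Int) + 1 = 11 := by norm_num
        rw [h11]
        simp [pvOmit]
      · have hlt : n < 10 := lt_of_le_of_ne hn h10
        rw [if_neg (by omega)]
        have hcast : ((n : Nat) : Int) + 1 = ((n + 1 : Nat) : Int) := by push_cast; ring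
        rw [hcast, ih (acc ++ [pvTrunc t]) (n + 1) (by omega)]
        have htake : 10 - n = (10 - (n + 1)) + 1 := by omega
        rw [htake]
        simp only [List.take_succ_cons, List.map_cons, List.length_cons,
          Nat.add_lt_add_iff_right, List.append_assoc, List.cons_append, List.nil_append]
    · have hstep : pvA_loop ((r, t) :: rest) acc (n : Int) = pvA_loop rest acc (n : Int) := by
        simp [pvA_loop, hre]
      rw [hstep, pvUsers_cons_other r t rest hre, ih acc n hn]

-- ===== VERDICT (by name: the statement is the Claim_ definition above) =====
theorem summarize_exchanges_spec : Claim_equal_summarize_exchanges := by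
  intro exchanges _
  unfold Spec_summarize_exchanges summarize_exchanges
  rw [show (0 : Int) = ((0 : Nat) : Int) from rfl, pvA_loop_eq exchanges [] 0 (by omega)]
  simp only [summarize_exchanges_alt]
  have hu : List.filterMap (fun p => if p.1 == "user" then some p.2 else none) exchanges
      = pvUsers exchanges := rfl
  rw [hu]
  have hslice : PySem.List.slice (pvUsers exchanges) none (some 10)
      = (pvUsers exchanges).take 10 := by
    rw [PySem.List.slice_to _ (by norm_num), show Int.toNat 10 = 10 from rfl]
  rw [hslice]
  have hf : List.map (fun text => ((("user" : String), if 300 < PySem.Str.len text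
        then PySem.Str.slice text none (some 300) ++ "... [truncated]" else text)))
        ((pvUsers exchanges).take 10)
      = List.map pvTrunc ((pvUsers exchanges).take 10) := rfl
  rw [hf]
  have h11 : (("user" : String), "... [" ++ PySem.Int.toStr (10 + 1) ++ "+ more user turns omitted] ...") = pvOmit := rfl
  rw [h11]
  by_cases h : 10 < (pvUsers exchanges).length
  · rw [if_pos (by omega : 10 - 0 < (pvUsers exchanges).length), if_pos h]
    simp
  · rw [if_neg (by omega : ¬ 10 - 0 < (pvUsers exchanges).length), if_neg h]
    simp
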